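-- pv_equiv track=rewrite | github.com/Arsen1302/Code-copy-detector | TestData/solutions/problem_545_5.py | solution_545_5
-- ===== SOURCE A (Python) =====
-- def solution_545_5(p: int, q: int) -> int:
--     '''
--       Using simple geometry and just by observing we can decide where
--       will the ray hit. for example:
--       p = 2, q = 1; the ray first meets 2nd receptor after it gets reflected
--       for 1 time
--       p = 3, q = 1; the ray first meets 1st receptor after it gets reflected
--       for 2 times.
--       From the given examples one can easly observe that
--       1:if p is even and q is odd, it'll surely hit 2nd receptor for the first
--       time
--       2:if both p and q is odd, it'll surely hit 1st receptor for the first time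
--
--     '''
--     # base case if both p and q are equal, it will always hit receptor 1,
--     # irrespective of their nature
--     if p == q:
--         return 1
--
--     while p % 2 == 0 and q % 2 == 0:
--         p //= 2
--         q //= 2
--
--     if p % 2 == 1 and q % 2 == 0:
--         return 0
--     elif p % 2 == 1 and q % 2 == 1:
--         return 1
--     elif p % 2 == 0 and q % 2 == 1:
--         return 2
-- ===== SOURCE B (Python) =====
-- def solution_545_5(p: int, q: int) -> int:
--     if p == q:
--         return 1
--     v = p | q
--     k = (v & -v).bit_length() - 1
--     return 1 + ((q >> k) & 1) - ((p >> k) & 1)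
-- ===== Notes on version B (the rewrite author's own statement) =====
-- stated objective: alternative
-- what changed: Replaces A's halve-both-while-even loop with a closed-form computation: the common power of two is read off as the lowest set bit of p|q ((v&-v).bit_length()-1) and the answer is the arithmetic expression 1 + ((q>>k)&1) - ((p>>k)&1) instead of A's three-way parity branch.
import Mathlib
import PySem

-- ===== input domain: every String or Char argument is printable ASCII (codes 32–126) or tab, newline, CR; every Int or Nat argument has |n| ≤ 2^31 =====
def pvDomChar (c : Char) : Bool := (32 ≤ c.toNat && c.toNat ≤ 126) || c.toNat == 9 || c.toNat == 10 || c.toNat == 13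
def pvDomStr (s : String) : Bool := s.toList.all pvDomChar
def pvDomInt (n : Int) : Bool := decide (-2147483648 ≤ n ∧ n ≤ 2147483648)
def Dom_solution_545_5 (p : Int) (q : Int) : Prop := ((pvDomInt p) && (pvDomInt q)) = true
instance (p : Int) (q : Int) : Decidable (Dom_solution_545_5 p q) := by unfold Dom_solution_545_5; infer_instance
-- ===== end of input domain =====

-- B replaces A's halve-while-both-even loop by a closed form: k = trailing zeros of p|q
-- via (v & -v).bit_length() - 1, answer = 1 + ((q>>k)&1) - ((p>>k)&1); same value everywhere.


-- ===== PORT A =====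
-- the while loop: `while p % 2 == 0 and q % 2 == 0: p //= 2; q //= 2`
-- (the extra conjunct `p ≠ 0 ∨ q ≠ 0` is a totality guard only: Python reaches the loop
-- only with p ≠ q, where it is always true)
def pvLoopA (p : Int) (q : Int) : Int × Int :=
  if h : (PySem.Int.mod p 2 = 0 ∧ PySem.Int.mod q 2 = 0) ∧ (p ≠ 0 ∨ q ≠ 0) then
    pvLoopA (PySem.Int.floordiv p 2) (PySem.Int.floordiv q 2)
  else (p, q)
termination_by p.natAbs + q.natAbs
decreasing_by
  obtain ⟨⟨hp, hq⟩, hnz⟩ := h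
  rw [PySem.Int.mod_eq_zero_iff_dvd] at hp hq
  rw [PySem.Int.floordiv_eq_ediv_of_pos (by norm_num), PySem.Int.floordiv_eq_ediv_of_pos (by norm_num)]
  obtain ⟨a, rfl⟩ := hp; obtain ⟨b, rfl⟩ := hq
  rw [Int.mul_ediv_cancel_left a (by norm_num), Int.mul_ediv_cancel_left b (by norm_num)]
  have h2 : ((2:Int)).natAbs = 2 := rfl
  simp only [Int.natAbs_mul, h2]
  omega

def solution_545_5 (p : Int) (q : Int) : Int :=
  if p = q then 1
  else
    let r := pvLoopA p q
    if PySem.Int.mod r.1 2 = 1 ∧ PySem.Int.mod r.2 2 = 0 then 0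
    else if PySem.Int.mod r.1 2 = 1 ∧ PySem.Int.mod r.2 2 = 1 then 1
    else if PySem.Int.mod r.1 2 = 0 ∧ PySem.Int.mod r.2 2 = 1 then 2
    else 0  -- unreachable: after the loop p, q are never both even (Python would fall through)

-- ===== PORT B =====
def solution_545_5_alt (p : Int) (q : Int) : Int :=
  if p = q then 1
  else
    let v := PySem.Int.bor p q
    let k : Nat := PySem.Int.bitLength (PySem.Int.band v (-v)) - 1
    1 + PySem.Int.band (q >>> k) 1 - PySem.Int.band (p >>> k) 1

-- ===== PRECONDITION & SPEC =====
def Spec_solution_545_5 (p : Int) (q : Int) (out : Int) : Prop := out = solution_545_5_alt p q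
instance (p : Int) (q : Int) (out : Int) : Decidable (Spec_solution_545_5 p q out) := by unfold Spec_solution_545_5; infer_instance

-- ===== CLAIM (what is proved, stated in full; the proofs are below) =====
def Claim_equal_solution_545_5 : Prop := ∀ (p : Int) (q : Int), Dom_solution_545_5 p q → Spec_solution_545_5 p q (solution_545_5 p q)

-- ===== LEMMAS AND PROOFS =====

-- Nat bit lemmas
theorem pv_lor_double (a b : Nat) : (2*a) ||| (2*b) = 2*(a ||| b) := by
  apply Nat.eq_of_testBit_eq; intro i
  cases i with
  | zero => simp [Nat.testBit_zero, Nat.testBit_lor, Nat.mul_mod_right]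
  | succ j =>
      rw [Nat.testBit_lor, Nat.testBit_succ, Nat.testBit_succ, Nat.testBit_succ]
      rw [Nat.mul_div_cancel_left a (by norm_num : 0 < 2), Nat.mul_div_cancel_left b (by norm_num : 0 < 2),
          Nat.mul_div_cancel_left (a ||| b) (by norm_num : 0 < 2)]
      exact (Nat.testBit_lor a b j).symm

theorem pv_land_odd_even (d m : Nat) : (2*d+1) &&& (2*m) = 2*(d &&& m) := by
  apply Nat.eq_of_testBit_eq; intro i
  cases i with
  | zero => simp [Nat.testBit_zero, Nat.testBit_land, Nat.mul_mod_right, Nat.mul_add_mod]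
  | succ j =>
      have h1 : (2*d+1)/2 = d := by omega
      have h2 : (2*m)/2 = m := by omega
      have h3 : (2*(d &&& m))/2 = d &&& m := by omega
      rw [Nat.testBit_land, Nat.testBit_succ, Nat.testBit_succ, Nat.testBit_succ, h1, h2, h3]
      exact (Nat.testBit_land d m j).symm

theorem pv_land_odd_odd (c d : Nat) : (2*c+1) &&& (2*d+1) = 2*(c &&& d)+1 := by
  apply Nat.eq_of_testBit_eq; intro i
  cases i with
  | zero => simp [Nat.testBit_zero, Nat.testBit_land, Nat.mul_add_mod]
  | succ j =>
      have h1 : (2*c+1)/2 = c := by omega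
      have h2 : (2*d+1)/2 = d := by omega
      have h3 : (2*(c &&& d)+1)/2 = c &&& d := by omega
      rw [Nat.testBit_land, Nat.testBit_succ, Nat.testBit_succ, Nat.testBit_succ, h1, h2, h3]
      exact (Nat.testBit_land c d j).symm

theorem pv_lor_mod2 (m n : Nat) : ((m ||| n) % 2 = 1) ↔ (m % 2 = 1 ∨ n % 2 = 1) := by
  have := Nat.testBit_lor m n 0
  simp only [Nat.testBit_zero] at this
  rcases Nat.mod_two_eq_zero_or_one m with hm | hm <;>
    rcases Nat.mod_two_eq_zero_or_one n with hn | hn <;>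
    simp [hm, hn] at this ⊢ <;> omega

theorem pv_land_mod2 (m n : Nat) : ((m &&& n) % 2 = 1) ↔ (m % 2 = 1 ∧ n % 2 = 1) := by
  have := Nat.testBit_land m n 0
  simp only [Nat.testBit_zero] at this
  rcases Nat.mod_two_eq_zero_or_one m with hm | hm <;>
    rcases Nat.mod_two_eq_zero_or_one n with hn | hn <;>
    simp [hm, hn] at this ⊢ <;> omega

-- band v (-v) as a Nat expression on |v|
theorem pv_band_neg_self (v : Int) (hv : v ≠ 0) :
    PySem.Int.band v (-v) = ((v.natAbs - (v.natAbs &&& (v.natAbs - 1)) : Nat) : Int) := by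
  unfold PySem.Int.band
  rcases lt_or_gt_of_ne hv with h | h
  · rw [if_neg (by omega : ¬ (0:Int) ≤ v), if_pos (by omega : (0:Int) ≤ -v)]
    rw [show (-v).toNat = v.natAbs from by omega, show (-v - 1).toNat = v.natAbs - 1 from by omega]
  · rw [if_pos (by omega : (0:Int) ≤ v), if_neg (by omega : ¬ (0:Int) ≤ -v)]
    simp only [neg_neg]
    rw [show v.toNat = v.natAbs from by omega, show (v - 1).toNat = v.natAbs - 1 from by omega]

theorem pv_band_tz_odd (v : Int) (hv : v % 2 = 1) : PySem.Int.band v (-v) = 1 := by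
  have hv0 : v ≠ 0 := by omega
  rw [pv_band_neg_self v hv0]
  have hn : v.natAbs % 2 = 1 := by omega
  obtain ⟨a, ha⟩ : ∃ a, v.natAbs = 2*a+1 := ⟨v.natAbs / 2, by omega⟩
  rw [ha]
  have : (2*a+1) - 1 = 2*a := by omega
  rw [this, pv_land_odd_even a a]
  simp [Nat.and_self]

theorem pv_band_tz_even (v : Int) (hv0 : v ≠ 0) (hv : (2:Int) ∣ v) :
    PySem.Int.band v (-v) = 2 * PySem.Int.band (v/2) (-(v/2)) := by
  obtain ⟨w, rfl⟩ := hv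
  have hw0 : w ≠ 0 := by omega
  rw [Int.mul_ediv_cancel_left w (by norm_num)]
  rw [pv_band_neg_self _ hv0, pv_band_neg_self w hw0]
  have hA : (2*w).natAbs = 2 * w.natAbs := by simp [Int.natAbs_mul]
  rw [hA]
  obtain ⟨m, hm, hm0⟩ : ∃ m, w.natAbs = m ∧ 0 < m := ⟨w.natAbs, rfl, by omega⟩
  rw [hm]
  have h1 : 2*m - 1 = 2*(m-1)+1 := by omega
  rw [h1, Nat.land_comm, pv_land_odd_even (m-1) m, Nat.land_comm (m-1) m]
  have hle : m &&& (m-1) ≤ m - 1 := Nat.and_le_right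
  push_cast
  omega

theorem pv_band_neg_self_pos (v : Int) (hv : v ≠ 0) : 0 < PySem.Int.band v (-v) := by
  rw [pv_band_neg_self v hv]
  have h1 : v.natAbs &&& (v.natAbs - 1) ≤ v.natAbs - 1 := Nat.and_le_right
  have h2 : 0 < v.natAbs := by omega
  omega

-- bor: parity, halving, nonzero
theorem pv_bor_odd (p q : Int) (h : p % 2 = 1 ∨ q % 2 = 1) : (PySem.Int.bor p q) % 2 = 1 := by
  unfold PySem.Int.bor
  split_ifs with h1 h2 h2
  · have := pv_lor_mod2 p.toNat q.toNat
    generalize p.toNat ||| q.toNat = X at *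
    omega
  · have := pv_land_mod2 (-q-1).toNat p.toNat
    have hle : (-q-1).toNat &&& p.toNat ≤ (-q-1).toNat := Nat.and_le_left
    generalize (-q-1).toNat &&& p.toNat = X at *
    omega
  · have := pv_land_mod2 (-p-1).toNat q.toNat
    have hle : (-p-1).toNat &&& q.toNat ≤ (-p-1).toNat := Nat.and_le_left
    generalize (-p-1).toNat &&& q.toNat = X at *
    omega
  · have := pv_land_mod2 (-p-1).toNat (-q-1).toNat
    generalize (-p-1).toNat &&& (-q-1).toNat = X at *
    omega

theorem pv_bor_half (p q : Int) (hp : (2:Int) ∣ p) (hq : (2:Int) ∣ q) :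
    PySem.Int.bor p q = 2 * PySem.Int.bor (p/2) (q/2) := by
  obtain ⟨a, rfl⟩ := hp; obtain ⟨b, rfl⟩ := hq
  rw [Int.mul_ediv_cancel_left a (by norm_num), Int.mul_ediv_cancel_left b (by norm_num)]
  unfold PySem.Int.bor
  by_cases ha : (0:Int) ≤ a <;> by_cases hb : (0:Int) ≤ b
  · rw [if_pos (show (0:Int) ≤ 2*a by omega), if_pos (show (0:Int) ≤ 2*b by omega),
        if_pos ha, if_pos hb]
    have e1 : (2*a).toNat = 2*a.toNat := by omega
    have e2 : (2*b).toNat = 2*b.toNat := by omega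
    rw [e1, e2, pv_lor_double]
    push_cast; ring
  · rw [if_pos (show (0:Int) ≤ 2*a by omega), if_neg (show ¬ (0:Int) ≤ 2*b by omega),
        if_pos ha, if_neg hb]
    have e1 : (-(2*b)-1).toNat = 2*(-b-1).toNat + 1 := by omega
    have e2 : (2*a).toNat = 2*a.toNat := by omega
    rw [e1, e2, pv_land_odd_even]
    have hle : (-b-1).toNat &&& a.toNat ≤ (-b-1).toNat := Nat.and_le_left
    generalize hX : (-b-1).toNat &&& a.toNat = X at *
    push_cast
    omega
  · rw [if_neg (show ¬ (0:Int) ≤ 2*a by omega), if_pos (show (0:Int) ≤ 2*b by omega),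
        if_neg ha, if_pos hb]
    have e1 : (-(2*a)-1).toNat = 2*(-a-1).toNat + 1 := by omega
    have e2 : (2*b).toNat = 2*b.toNat := by omega
    rw [e1, e2, pv_land_odd_even]
    have hle : (-a-1).toNat &&& b.toNat ≤ (-a-1).toNat := Nat.and_le_left
    generalize hX : (-a-1).toNat &&& b.toNat = X at *
    push_cast
    omega
  · rw [if_neg (show ¬ (0:Int) ≤ 2*a by omega), if_neg (show ¬ (0:Int) ≤ 2*b by omega),
        if_neg ha, if_neg hb]
    have e1 : (-(2*a)-1).toNat = 2*(-a-1).toNat + 1 := by omega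
    have e2 : (-(2*b)-1).toNat = 2*(-b-1).toNat + 1 := by omega
    rw [e1, e2, pv_land_odd_odd]
    generalize (-a-1).toNat &&& (-b-1).toNat = X
    push_cast
    omega

theorem pv_bor_ne_zero (p q : Int) (h : p ≠ q) : PySem.Int.bor p q ≠ 0 := by
  unfold PySem.Int.bor
  split_ifs with h1 h2 h2
  · intro hc
    have h0 : p.toNat ||| q.toNat = 0 := by exact_mod_cast hc
    have l1 : p.toNat ≤ p.toNat ||| q.toNat := Nat.left_le_or
    have l2 : q.toNat ≤ q.toNat ||| p.toNat := Nat.left_le_or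
    rw [Nat.lor_comm] at l2
    omega
  · omega
  · omega
  · omega

-- the loop, one step / exit
theorem pv_loopA_step (p q : Int) (hnz : p ≠ 0 ∨ q ≠ 0) (hp : (2:Int) ∣ p) (hq : (2:Int) ∣ q) :
    pvLoopA p q = pvLoopA (p/2) (q/2) := by
  rw [pvLoopA]
  rw [dif_pos ⟨⟨(PySem.Int.mod_eq_zero_iff_dvd p 2).mpr hp, (PySem.Int.mod_eq_zero_iff_dvd q 2).mpr hq⟩, hnz⟩]
  rw [PySem.Int.floordiv_eq_ediv_of_pos (by norm_num), PySem.Int.floordiv_eq_ediv_of_pos (by norm_num)]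

theorem pv_loopA_exit (p q : Int) (h : ¬ ((2:Int) ∣ p ∧ (2:Int) ∣ q)) : pvLoopA p q = (p, q) := by
  rw [pvLoopA, dif_neg]
  intro ⟨⟨hp, hq⟩, _⟩
  exact h ⟨(PySem.Int.mod_eq_zero_iff_dvd p 2).mp hp, (PySem.Int.mod_eq_zero_iff_dvd q 2).mp hq⟩

-- main equality for p ≠ q, by strong induction on |p|+|q|
theorem pv_main : ∀ (n : Nat) (p q : Int), p.natAbs + q.natAbs = n → p ≠ q →
    solution_545_5 p q = solution_545_5_alt p q := by
  intro n
  induction n using Nat.strong_induction_on with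
  | _ n ih =>
    intro p q hn hne
    by_cases hev : (2:Int) ∣ p ∧ (2:Int) ∣ q
    · -- both even: both sides reduce to the half input
      obtain ⟨⟨a, rfl⟩, ⟨b, rfl⟩⟩ := hev
      have hab : a ≠ b := by intro h; exact hne (by rw [h])
      have hnz : (2:Int)*a ≠ 0 ∨ (2:Int)*b ≠ 0 := by
        by_contra hc; push_neg at hc; apply hne; rw [hc.1, hc.2]
      have hlt : a.natAbs + b.natAbs < n := by
        have : ((2:Int)*a).natAbs = 2 * a.natAbs := by simp [Int.natAbs_mul]
        have : ((2:Int)*b).natAbs = 2 * b.natAbs := by simp [Int.natAbs_mul]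
        simp [Int.natAbs_mul] at hn
        omega
      have hrec := ih _ hlt a b rfl hab
      -- A side
      have hA : solution_545_5 (2*a) (2*b) = solution_545_5 a b := by
        unfold solution_545_5
        rw [if_neg hne, if_neg hab]
        have hl : pvLoopA (2*a) (2*b) = pvLoopA a b := by
          rw [pv_loopA_step _ _ hnz ⟨a, rfl⟩ ⟨b, rfl⟩,
              Int.mul_ediv_cancel_left a (by norm_num), Int.mul_ediv_cancel_left b (by norm_num)]
        rw [hl]
      -- B side
      have hB : solution_545_5_alt (2*a) (2*b) = solution_545_5_alt a b := by
        unfold solution_545_5_alt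
        rw [if_neg hne, if_neg hab]
        show 1 + PySem.Int.band ((2*b) >>> (PySem.Int.bitLength (PySem.Int.band (PySem.Int.bor (2*a) (2*b)) (-(PySem.Int.bor (2*a) (2*b)))) - 1)) 1 - PySem.Int.band ((2*a) >>> (PySem.Int.bitLength (PySem.Int.band (PySem.Int.bor (2*a) (2*b)) (-(PySem.Int.bor (2*a) (2*b)))) - 1)) 1 =
          1 + PySem.Int.band (b >>> (PySem.Int.bitLength (PySem.Int.band (PySem.Int.bor a b) (-(PySem.Int.bor a b))) - 1)) 1 - PySem.Int.band (a >>> (PySem.Int.bitLength (PySem.Int.band (PySem.Int.bor a b) (-(PySem.Int.bor a b))) - 1)) 1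
        have hv0 : PySem.Int.bor (2*a) (2*b) ≠ 0 := pv_bor_ne_zero _ _ hne
        have hvh : PySem.Int.bor (2*a) (2*b) = 2 * PySem.Int.bor a b := by
          rw [pv_bor_half _ _ ⟨a, rfl⟩ ⟨b, rfl⟩,
              Int.mul_ediv_cancel_left a (by norm_num), Int.mul_ediv_cancel_left b (by norm_num)]
        have hv'0 : PySem.Int.bor a b ≠ 0 := pv_bor_ne_zero _ _ hab
        set v' := PySem.Int.bor a b with hv'
        have hbe : PySem.Int.band (2*v') (-(2*v')) = 2 * PySem.Int.band v' (-v') := by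
          have := pv_band_tz_even (2*v') (by simpa [hvh] using hv0) ⟨v', rfl⟩
          rwa [Int.mul_ediv_cancel_left v' (by norm_num)] at this
        set c := PySem.Int.band v' (-v') with hc
        have hcpos : 0 < c := pv_band_neg_self_pos v' hv'0
        have hbl : PySem.Int.bitLength (2*c) = PySem.Int.bitLength c + 1 := by
          have := PySem.Int.bitLength_of_pos (n := 2*c) (by omega)
          rwa [show PySem.Int.floordiv (2*c) 2 = c by
            rw [PySem.Int.floordiv_eq_ediv_of_pos (by norm_num)]
            exact Int.mul_ediv_cancel_left c (by norm_num)] at this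
        have hclpos : 1 ≤ PySem.Int.bitLength c := by
          have := PySem.Int.bitLength_of_pos (n := c) hcpos
          omega
        rw [hvh, hbe, hbl]
        have hk : PySem.Int.bitLength c + 1 - 1 = (PySem.Int.bitLength c - 1) + 1 := by omega
        rw [hk]
        set k := PySem.Int.bitLength c - 1 with hkdef
        have hsh : ∀ x : Int, (2*x) >>> (k+1) = x >>> k := by
          intro x
          rw [Int.shiftRight_eq_div_pow, Int.shiftRight_eq_div_pow]
          rw [pow_succ']
          push_cast
          rw [Int.mul_ediv_mul_of_pos _ _ (by norm_num : (0:Int) < 2)]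
        rw [hsh a, hsh b]
      rw [hA, hB, hrec]
    · -- base: not both even — loop exits at once, k = 0
      have hvodd : (PySem.Int.bor p q) % 2 = 1 := by
        apply pv_bor_odd
        rcases Int.emod_two_eq p with hp | hp
        · rcases Int.emod_two_eq q with hq | hq
          · exact absurd ⟨Int.dvd_of_emod_eq_zero hp, Int.dvd_of_emod_eq_zero hq⟩ hev
          · exact Or.inr hq
        · exact Or.inl hp
      unfold solution_545_5 solution_545_5_alt
      rw [if_neg hne, if_neg hne]
      show (if PySem.Int.mod (pvLoopA p q).1 2 = 1 ∧ PySem.Int.mod (pvLoopA p q).2 2 = 0 then 0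
            else if PySem.Int.mod (pvLoopA p q).1 2 = 1 ∧ PySem.Int.mod (pvLoopA p q).2 2 = 1 then 1
            else if PySem.Int.mod (pvLoopA p q).1 2 = 0 ∧ PySem.Int.mod (pvLoopA p q).2 2 = 1 then 2 else 0)
        = 1 + PySem.Int.band (q >>> (PySem.Int.bitLength (PySem.Int.band (PySem.Int.bor p q) (-(PySem.Int.bor p q))) - 1)) 1 - PySem.Int.band (p >>> (PySem.Int.bitLength (PySem.Int.band (PySem.Int.bor p q) (-(PySem.Int.bor p q))) - 1)) 1
      rw [pv_loopA_exit p q hev]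
      have hband : PySem.Int.band (PySem.Int.bor p q) (-(PySem.Int.bor p q)) = 1 :=
        pv_band_tz_odd _ hvodd
      rw [hband]
      have hbl1 : PySem.Int.bitLength 1 = 1 := by decide
      rw [hbl1]
      simp only [Nat.sub_self]
      have hsh0 : ∀ x : Int, x >>> (0:Nat) = x := by
        intro x; rw [Int.shiftRight_eq_div_pow]; simp
      rw [hsh0, hsh0]
      rw [PySem.Int.band_one, PySem.Int.band_one]
      rw [PySem.Int.mod_eq_emod_of_pos (by norm_num), PySem.Int.mod_eq_emod_of_pos (by norm_num)]
      have hpm := Int.emod_two_eq p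
      have hqm := Int.emod_two_eq q
      have hnev : ¬ (p % 2 = 0 ∧ q % 2 = 0) := by
        intro ⟨h1, h2⟩
        exact hev ⟨Int.dvd_of_emod_eq_zero h1, Int.dvd_of_emod_eq_zero h2⟩
      rcases hpm with hp | hp <;> rcases hqm with hq | hq <;> simp [hp, hq] at hnev ⊢ <;> omega

-- ===== VERDICT (by name: the statement is the Claim_ definition above) =====
theorem solution_545_5_spec : Claim_equal_solution_545_5 := by
  intro p q _
  unfold Spec_solution_545_5
  by_cases h : p = q
  · unfold solution_545_5 solution_545_5_alt
    rw [if_pos h, if_pos h]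
  · exact pv_main _ p q rfl h
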